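-- pv_equiv track=rewrite | github.com/Patel-Suchi/PlayNineSolitaire | play_nine_player.py | turn_card
-- ===== SOURCE A (Python) =====
-- def turn_card(top_concealed, bottom_concealed):
--     if '*' in top_concealed:
--         index = get_index(top_concealed, '*')
--         for i in index:
--             if bottom_concealed[i] != '*':
--                 a = 0
--                 b = i
--                 return a, b
--     if '*' in bottom_concealed:
--         index = get_index(bottom_concealed, '*')
--         for i in index:
--             if top_concealed[i] != '*':
--                 a = 1
--                 b = i
--                 return a, b
--
--     if '*' in top_concealed:
--         a = 0
--         b = top_concealed.index('*')
--         return a, b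
--     else:
--         a = 1
--         b = bottom_concealed.index('*')
--         return a, b
--
-- def get_index(index_list, element):
--     index = []
--     for i in range(len(index_list)):
--         if index_list[i] == element:
--             index.append(i)
--     return index
-- ===== SOURCE B (Python) =====
-- def turn_card(top_concealed, bottom_concealed):
--     # Score every concealed ('*') position with a numeric priority and pick the
--     # lexicographic minimum of the scored candidates:
--     #   0 = top star over a visible bottom card, 1 = bottom star under a visible top card,
--     #   2 = any top star, 3 = any bottom star.
--     candidates = []
--     for i, card in enumerate(top_concealed):
--         if card == '*':
--             pr = 0 if i < len(bottom_concealed) and bottom_concealed[i] != '*' else 2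
--             candidates.append((pr, i, 0))
--     for i, card in enumerate(bottom_concealed):
--         if card == '*':
--             pr = 1 if i < len(top_concealed) and top_concealed[i] != '*' else 3
--             candidates.append((pr, i, 1))
--     best = min(candidates)
--     return best[2], best[1]
-- ===== Notes on version B (the rewrite author's own statement) =====
-- stated objective: alternative
-- what changed: B replaces A's four staged prioritized scans (index-list building plus re-scans and fallbacks) by scoring every concealed position with a numeric priority (0 top star over a visible card, 1 bottom star under a visible card, 2 any top star, 3 any bottom star) and returning the lexicographic minimum of the scored candidates.
import Mathlib
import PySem

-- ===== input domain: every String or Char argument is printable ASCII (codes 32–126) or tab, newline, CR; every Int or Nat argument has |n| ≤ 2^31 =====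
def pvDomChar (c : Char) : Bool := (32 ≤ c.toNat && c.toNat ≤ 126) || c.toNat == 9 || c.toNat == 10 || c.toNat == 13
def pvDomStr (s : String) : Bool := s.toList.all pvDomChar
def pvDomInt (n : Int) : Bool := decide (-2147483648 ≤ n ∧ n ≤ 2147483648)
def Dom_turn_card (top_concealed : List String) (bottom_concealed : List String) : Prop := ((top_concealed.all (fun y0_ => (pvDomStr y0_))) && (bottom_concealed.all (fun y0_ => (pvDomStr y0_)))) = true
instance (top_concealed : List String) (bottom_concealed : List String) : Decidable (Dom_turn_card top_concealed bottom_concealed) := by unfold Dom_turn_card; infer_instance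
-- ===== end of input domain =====

-- B replaces A's four staged prioritized scans by scoring every '*' position with a
-- numeric priority and taking the lexicographic minimum of the scored candidates
-- (objective: alternative decomposition, same O(n) cost).

-- ===== PORT A =====
-- helper get_index: "for i in range(len(index_list)): if index_list[i] == element: index.append(i)"
def get_index (index_list : List String) (element : String) : List Int :=
  (PySem.List.pyRange 0 (index_list.length : Int) 1).filter
    (fun i => PySem.List.pyGet? index_list i == some element)

-- "for i in index: if other[i] != '*': return i"; Python raises IndexError when other[i] is
-- out of range (outside Pre_); the port skips such i.
def scan_reveal (other : List String) : List Int → Option Int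
  | [] => none
  | i :: rest =>
    match PySem.List.pyGet? other i with
    | some c => if c ≠ "*" then some i else scan_reveal other rest
    | none => scan_reveal other rest

-- "xs.index(e)"; Python raises ValueError when e ∉ xs (outside Pre_); the port returns 0 there.
def py_index (xs : List String) (e : String) : Int :=
  match PySem.List.index? xs e with
  | some k => (k : Int)
  | none => 0

def turn_card (top_concealed : List String) (bottom_concealed : List String) : Int × Int :=
  match (if "*" ∈ top_concealed then scan_reveal bottom_concealed (get_index top_concealed "*") else none) with
  | some b => (0, b)
  | none =>
    match (if "*" ∈ bottom_concealed then scan_reveal top_concealed (get_index bottom_concealed "*") else none) with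
    | some b => (1, b)
    | none =>
      if "*" ∈ top_concealed then (0, py_index top_concealed "*")
      else (1, py_index bottom_concealed "*")

-- ===== PORT B =====
-- Python's tuple '<' on (pr, i, tag) triples: lexicographic.
def lexLt (x y : Int × Int × Int) : Bool :=
  decide (x.1 < y.1 ∨ (x.1 = y.1 ∧ (x.2.1 < y.2.1 ∨ (x.2.1 = y.2.1 ∧ x.2.2 < y.2.2))))

-- builtin min over a list of triples: running first-minimum (none = empty list, where Python raises ValueError)
def min_step (b : Option (Int × Int × Int)) (c : Int × Int × Int) : Option (Int × Int × Int) :=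
  match b with
  | none => some c
  | some m => if lexLt c m then some c else some m

-- body of B's candidate loops: "if card == '*': pr = hit if i < len(other) and other[i] != '*' else miss; candidates.append((pr, i, tag))"
def cand_step (other : List String) (prHit prMiss tag : Int) (acc : List (Int × Int × Int)) (p : Int × String) : List (Int × Int × Int) :=
  if p.2 = "*" then
    acc ++ [((if p.1 < PySem.List.len other ∧ PySem.List.pyGetD other p.1 "" ≠ "*" then prHit else prMiss), p.1, tag)]
  else acc

def turn_card_alt (top_concealed : List String) (bottom_concealed : List String) : Int × Int :=
  let cands := (PySem.List.enumerate bottom_concealed 0).foldl (cand_step top_concealed 1 3 1)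
                 ((PySem.List.enumerate top_concealed 0).foldl (cand_step bottom_concealed 0 2 0) [])
  -- "best = min(candidates)"; Python raises ValueError on an empty list (no '*' anywhere; outside Pre_)
  match cands.foldl min_step none with
  | some best => (best.2.2, best.2.1)
  | none => (1, 0)

-- ===== PRECONDITION & SPEC =====
-- every '*' in xs at an index out of range of ys is preceded by a '*' of xs over a non-'*' card of ys
def no_oob_star (xs ys : List String) : Bool :=
  (List.range xs.length).all fun i =>
    xs[i]? != some "*" || decide (i < ys.length) ||
    (List.range i).any fun j =>
      xs[j]? == some "*" && decide (j < ys.length) && ys[j]? != some "*"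

-- every '*' in xs sits over a '*' of ys
def covered (xs ys : List String) : Bool :=
  (List.range xs.length).all fun i => xs[i]? != some "*" || ys[i]? == some "*"

-- Pre_ excludes exactly the inputs where Python A raises: no '*' anywhere (ValueError), or a
-- concealed '*' whose index is out of range of the other row before any earlier '*' lets the
-- scan return a position (IndexError).
def Pre_turn_card (top_concealed : List String) (bottom_concealed : List String) : Prop :=
  ("*" ∈ top_concealed ∨ "*" ∈ bottom_concealed) ∧
  no_oob_star top_concealed bottom_concealed = true ∧
  (covered top_concealed bottom_concealed = true →
    no_oob_star bottom_concealed top_concealed = true)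
instance (top_concealed : List String) (bottom_concealed : List String) : Decidable (Pre_turn_card top_concealed bottom_concealed) := by unfold Pre_turn_card; infer_instance

def pvWitness_turn_card : List String × List String := (["*", "3"], ["7", "*"])

def Spec_turn_card (top_concealed : List String) (bottom_concealed : List String) (out : Int × Int) : Prop := out = turn_card_alt top_concealed bottom_concealed
instance (top_concealed : List String) (bottom_concealed : List String) (out : Int × Int) : Decidable (Spec_turn_card top_concealed bottom_concealed out) := by unfold Spec_turn_card; infer_instance

-- ===== CLAIM (what is proved, stated in full; the proofs are below) =====
def Claim_equal_turn_card : Prop := ∀ (top_concealed : List String) (bottom_concealed : List String), Dom_turn_card top_concealed bottom_concealed → Pre_turn_card top_concealed bottom_concealed → Spec_turn_card top_concealed bottom_concealed (turn_card top_concealed bottom_concealed)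

-- ===== LEMMAS AND PROOFS =====

-- the '*'-index list of the first n positions of xs (get_index xs "*" is star_filter xs xs.length)
def star_filter (xs : List String) (n : Nat) : List Int :=
  (PySem.List.pyRange 0 (n : Int) 1).filter (fun i => PySem.List.pyGet? xs i == some "*")

theorem get_index_eq_star_filter (xs : List String) :
    get_index xs "*" = star_filter xs xs.length := rfl

theorem star_filter_eq_map (xs : List String) (n : Nat) :
    star_filter xs n =
      ((List.range n).filter (fun k => xs[k]? == some "*")).map (Nat.cast : Nat → Int) := by
  unfold star_filter
  rw [PySem.List.pyRange_one]
  simp only [zero_add, sub_zero, Int.toNat_natCast, List.filter_map, Function.comp_def,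
    PySem.List.pyGet?_natCast]

theorem star_filter_nil_of_not_mem (xs : List String) (h : "*" ∉ xs) :
    star_filter xs xs.length = [] := by
  rw [star_filter_eq_map]
  rw [List.filter_eq_nil_iff.mpr, List.map_nil]
  intro k _
  simp only [beq_iff_eq]
  intro hk
  exact h (List.mem_of_getElem? hk)

theorem range_head_index (xs : List String) :
    ((List.range xs.length).filter (fun k => xs[k]? == some "*")).head?
      = PySem.List.index? xs "*" := by
  induction xs with
  | nil => simp [PySem.List.index?_eq_idxOf?]
  | cons x xs ih =>
    rw [show (x :: xs).length = xs.length + 1 from rfl, List.range_succ_eq_map,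
      List.filter_cons]
    by_cases hx : x = "*"
    · subst hx
      rw [PySem.List.index?_cons_self, if_pos (by simp)]
      rfl
    · rw [if_neg (by simp [hx]), List.filter_map, PySem.List.index?_cons_of_ne xs hx,
        ← ih, List.head?_map]
      have : ((fun k => (x :: xs)[k]? == some "*") ∘ Nat.succ) = (fun k => xs[k]? == some "*") := by
        funext k; simp
      rw [this]

theorem head_star_filter (xs : List String) :
    (star_filter xs xs.length).head? = (PySem.List.index? xs "*").map (Nat.cast : Nat → Int) := by
  rw [star_filter_eq_map, List.head?_map, range_head_index]

theorem star_filter_pairwise (xs : List String) (n : Nat) :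
    (star_filter xs n).Pairwise (· < ·) := by
  rw [star_filter_eq_map]
  refine List.pairwise_map.mpr ((List.Pairwise.sublist List.filter_sublist (List.pairwise_lt_range)).imp ?_)
  intro a b hab
  exact_mod_cast hab

-- whether a star at position i of a row is revealable against the other row
def hitB (other : List String) (i : Int) : Bool :=
  match PySem.List.pyGet? other i with
  | some c => c ≠ "*"
  | none => false

theorem cand_fold (other xs : List String) (ph pm tag : Int) (init : List (Int × Int × Int)) :
    (PySem.List.enumerate xs 0).foldl (cand_step other ph pm tag) init
      = init ++ (star_filter xs xs.length).map
          (fun i => ((if hitB other i then ph else pm), i, tag)) := by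
  rw [PySem.List.enumerate_eq_map_pyRange xs "", List.foldl_map]
  simp only [cand_step, PySem.List.len_eq]
  rw [PySem.List.foldl_append_ite]
  congr 1
  unfold star_filter
  rw [List.filter_congr (q := fun i => PySem.List.pyGet? xs i == some "*")
      (by
        intro i hi
        have h0 : 0 ≤ i := (PySem.List.mem_pyRange_one.mp hi).1
        have hl : i < (xs.length : Int) := by
          have := (PySem.List.mem_pyRange_one.mp hi).2
          simpa [PySem.List.len] using this
        simp only [PySem.List.pyGetD_eq_getElem xs "" h0 hl,
          PySem.List.pyGet?_eq_some_getElem xs h0 hl]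
        by_cases hstar : xs[i.toNat] = "*" <;> simp [hstar])]
  rw [List.map_congr_left]
  intro i hi
  have h0 : 0 ≤ i := (PySem.List.mem_pyRange_one.mp (List.mem_filter.mp hi).1).1
  by_cases hlt : i < (other.length : Int)
  · simp only [PySem.List.pyGetD_eq_getElem other "" h0 hlt, hitB,
      PySem.List.pyGet?_eq_some_getElem other h0 hlt]
    by_cases hstar : other[i.toNat] = "*" <;> simp [hstar, hlt]
  · have hnone : PySem.List.pyGet? other i = none := by
      rw [PySem.List.pyGet?_eq_none_iff]
      intro hr
      exact hlt hr.2
    simp [hitB, hnone, hlt]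

theorem lexLt_trans {a b c : Int × Int × Int} (h1 : lexLt a b = true) (h2 : lexLt b c = true) :
    lexLt a c = true := by
  obtain ⟨a1, a2, a3⟩ := a; obtain ⟨b1, b2, b3⟩ := b; obtain ⟨c1, c2, c3⟩ := c
  simp only [lexLt, decide_eq_true_eq] at *
  omega

theorem lexLt_not_trans {a b c : Int × Int × Int} (h1 : lexLt a b = false) (h2 : lexLt b c = false) :
    lexLt a c = false := by
  obtain ⟨a1, a2, a3⟩ := a; obtain ⟨b1, b2, b3⟩ := b; obtain ⟨c1, c2, c3⟩ := c
  simp only [lexLt, decide_eq_false_iff_not] at *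
  omega

-- restarting the running minimum from a seed m
theorem min_resume (l : List (Int × Int × Int)) :
    ∀ m : Int × Int × Int,
      l.foldl min_step (some m) =
        match l.foldl min_step none with
        | none => some m
        | some m' => if lexLt m' m then some m' else some m := by
  induction l with
  | nil => intro m; rfl
  | cons c t ih =>
    intro m
    simp only [List.foldl_cons]
    have hs1 : min_step (some m) c = if lexLt c m then some c else some m := rfl
    have hs0 : min_step none c = some c := rfl
    rw [hs1, hs0]
    by_cases P : lexLt c m = true
    · rw [if_pos P, ih c]
      cases hr : t.foldl min_step none with
      | none => simp [P]
      | some m' =>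
        by_cases Q : lexLt m' c = true
        · simp [Q, lexLt_trans Q P]
        · simp [Q, P]
    · rw [if_neg P, ih m, ih c]
      cases hr : t.foldl min_step none with
      | none => simp [P]
      | some m' =>
        have Pf : lexLt c m = false := by simpa using P
        by_cases Q : lexLt m' c = true
        · simp [Q]
        · have Qf : lexLt m' c = false := by simpa using Q
          simp [Q, Pf, lexLt_not_trans Qf Pf]

theorem scan_eq_hit (other : List String) (i : Int) (t : List Int) :
    scan_reveal other (i :: t) = if hitB other i then some i else scan_reveal other t := by
  cases hg : PySem.List.pyGet? other i with
  | none => simp [scan_reveal, hitB, hg]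
  | some c => by_cases hc : c = "*" <;> simp [scan_reveal, hitB, hg, hc]

theorem scan_mem (other : List String) (s : List Int) (b : Int)
    (h : scan_reveal other s = some b) : b ∈ s := by
  induction s with
  | nil => simp [scan_reveal] at h
  | cons i t ih =>
    rw [scan_eq_hit] at h
    by_cases hi : hitB other i = true
    · rw [if_pos hi] at h
      exact (Option.some.inj h) ▸ List.mem_cons_self
    · rw [if_neg hi] at h
      exact List.mem_cons_of_mem _ (ih h)

-- running minimum over one scored row
theorem row_min (other : List String) (ph pm tag : Int) (hp : ph < pm) (s : List Int)
    (hinc : s.Pairwise (· < ·)) :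
    ((s.map (fun i => ((if hitB other i then ph else pm), i, tag))).foldl min_step none)
      = match scan_reveal other s with
        | some b => some (ph, b, tag)
        | none =>
          match s.head? with
          | some h => some (pm, h, tag)
          | none => none := by
  induction s with
  | nil => rfl
  | cons i t ih =>
    have hlt : ∀ x ∈ t, i < x := fun x hx => (List.pairwise_cons.mp hinc).1 x hx
    have ihe := ih (List.pairwise_cons.mp hinc).2
    simp only [List.map_cons, List.foldl_cons, scan_eq_hit]
    have hs0 : min_step none ((if hitB other i then ph else pm), i, tag) = some ((if hitB other i then ph else pm), i, tag) := rfl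
    rw [hs0, min_resume, ihe]
    by_cases hi : hitB other i = true
    · rw [if_pos hi, if_pos hi]
      cases hs : scan_reveal other t with
      | some b =>
        have hb : i < b := hlt b (scan_mem other t b hs)
        have : lexLt (ph, b, tag) (ph, i, tag) = false := by
          simp only [lexLt, decide_eq_false_iff_not]; omega
        simp [this]
      | none =>
        cases hh : t.head? with
        | none => rfl
        | some h =>
          have : lexLt (pm, h, tag) (ph, i, tag) = false := by
            simp only [lexLt, decide_eq_false_iff_not]; omega
          simp [this]
    · rw [if_neg hi, if_neg hi]
      cases hs : scan_reveal other t with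
      | some b =>
        have : lexLt (ph, b, tag) (pm, i, tag) = true := by
          simp only [lexLt, decide_eq_true_eq]; omega
        simp [this]
      | none =>
        cases hh : t.head? with
        | none => rfl
        | some h =>
          have hb : i < h := hlt h (by
            cases t with
            | nil => simp at hh
            | cons y ys =>
              simp only [List.head?_cons, Option.some.injEq] at hh
              simp [hh])
          have : lexLt (pm, h, tag) (pm, i, tag) = false := by
            simp only [lexLt, decide_eq_false_iff_not]; omega
          simp [this]

theorem star_filter_cons_of_mem (xs : List String) (h : "*" ∈ xs) :
    ∃ v t, star_filter xs xs.length = v :: t := by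
  cases hc : star_filter xs xs.length with
  | cons v t => exact ⟨v, t, rfl⟩
  | nil =>
    exfalso
    have hh := head_star_filter xs
    rw [hc] at hh
    have hs := (PySem.List.index?_isSome_iff xs "*").mpr h
    cases hi : PySem.List.index? xs "*" with
    | none => rw [hi] at hs; simp at hs
    | some k => rw [hi] at hh; simp at hh

theorem py_index_eq_head (xs : List String) (v : Int)
    (h : (star_filter xs xs.length).head? = some v) : py_index xs "*" = v := by
  have hh := head_star_filter xs
  rw [h] at hh
  unfold py_index
  cases hi : PySem.List.index? xs "*" with
  | none => rw [hi] at hh; simp at hh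
  | some k => rw [hi] at hh; simp at hh; simp [hh]

theorem turn_card_eq (top bottom : List String) :
    turn_card top bottom = turn_card_alt top bottom := by
  have sTopP := star_filter_pairwise top top.length
  have sBotP := star_filter_pairwise bottom bottom.length
  unfold turn_card turn_card_alt
  rw [cand_fold bottom top 0 2 0 [], List.nil_append, cand_fold top bottom 1 3 1]
  dsimp only
  rw [List.foldl_append, row_min bottom 0 2 0 (by omega) _ sTopP,
    get_index_eq_star_filter, get_index_eq_star_filter]
  by_cases ht : "*" ∈ top
  · rw [if_pos ht]
    cases h1 : scan_reveal bottom (star_filter top top.length) with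
    | some b =>
      simp only [min_resume, row_min top 1 3 1 (by omega) _ sBotP]
      cases h2 : scan_reveal top (star_filter bottom bottom.length) with
      | some b2 => simp [lexLt]
      | none =>
        cases hh2 : (star_filter bottom bottom.length).head? with
        | none => rfl
        | some h2 => simp [lexLt]
    | none =>
      obtain ⟨h1v, t1, hcons⟩ := star_filter_cons_of_mem top ht
      rw [hcons]
      simp only [List.head?_cons]
      simp only [min_resume, row_min top 1 3 1 (by omega) _ sBotP]
      have hpy : py_index top "*" = h1v :=
        py_index_eq_head top h1v (by rw [hcons]; rfl)
      by_cases hb : "*" ∈ bottom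
      · rw [if_pos hb]
        cases h2 : scan_reveal top (star_filter bottom bottom.length) with
        | some b2 => simp [lexLt]
        | none =>
          obtain ⟨h2v, t2, hcons2⟩ := star_filter_cons_of_mem bottom hb
          rw [hcons2]
          simp only [List.head?_cons]
          simp [lexLt, ht, hpy]
      · rw [if_neg hb, star_filter_nil_of_not_mem bottom hb]
        simp only [scan_reveal, List.head?_nil]
        simp [ht, hpy]
  · rw [if_neg ht, star_filter_nil_of_not_mem top ht]
    simp only [scan_reveal, List.head?_nil]
    rw [row_min top 1 3 1 (by omega) _ sBotP]
    by_cases hb : "*" ∈ bottom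
    · rw [if_pos hb]
      cases h2 : scan_reveal top (star_filter bottom bottom.length) with
      | some b2 => rfl
      | none =>
        obtain ⟨h2v, t2, hcons2⟩ := star_filter_cons_of_mem bottom hb
        rw [hcons2]
        simp only [List.head?_cons]
        have hpy : py_index bottom "*" = h2v :=
          py_index_eq_head bottom h2v (by rw [hcons2]; rfl)
        simp [ht, hpy]
    · rw [if_neg hb, star_filter_nil_of_not_mem bottom hb]
      simp only [scan_reveal, List.head?_nil]
      have hn : PySem.List.index? bottom "*" = none := (PySem.List.index?_eq_none_iff bottom "*").mpr hb
      rw [PySem.List.index?_eq_idxOf?] at hn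
      simp [ht, py_index, hn]

-- ===== VERDICT (by name: the statement is the Claim_ definition above) =====
theorem turn_card_spec : Claim_equal_turn_card := by
  intro top bottom _ _
  unfold Spec_turn_card
  exact turn_card_eq top bottom
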